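-- pv_equiv track=rewrite | github.com/MohammadIzza/PBOWEEK2 | FibonaciFaktorial.py | fibonaciOrFactorial
-- ===== SOURCE A (Python) =====
-- def factorial(n):
--     if n == 0 or n == 1:
--         return 1
--     else:
--         return n * factorial(n-1)
--
-- def fibo(n):
--     if(n == 0):
--         return 0
--     elif(n == 1):
--         return 1
--     else:
--         return fibo(n-1) + fibo(n-2)
--
-- def fibonaciOrFactorial(n, elements, p):
--     sum = 0
--     if(p == 1):
--         for i in range(len(elements)):
--            sum += fibo(elements[i])
--     if(p == 2):
--          for i in range(len(elements)):
--            sum += factorial(elements[i])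
--     return sum
-- ===== SOURCE B (Python) =====
-- def _fib(m):
--     a, b = 0, 1
--     for _ in range(m):
--         a, b = b, a + b
--     return a
--
-- def _fact(m):
--     r = 1
--     for k in range(2, m + 1):
--         r *= k
--     return r
--
-- def fibonaciOrFactorial(n, elements, p):
--     if p == 1:
--         return sum(_fib(e) for e in elements)
--     if p == 2:
--         return sum(_fact(e) for e in elements)
--     return 0
-- ===== Notes on version B (the rewrite author's own statement) =====
-- stated objective: alternative
-- what changed: Replaces the recursive Fibonacci and factorial with iterative pair/product loops and sums directly over the elements instead of indexing by range(len(...)).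
import Mathlib
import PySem

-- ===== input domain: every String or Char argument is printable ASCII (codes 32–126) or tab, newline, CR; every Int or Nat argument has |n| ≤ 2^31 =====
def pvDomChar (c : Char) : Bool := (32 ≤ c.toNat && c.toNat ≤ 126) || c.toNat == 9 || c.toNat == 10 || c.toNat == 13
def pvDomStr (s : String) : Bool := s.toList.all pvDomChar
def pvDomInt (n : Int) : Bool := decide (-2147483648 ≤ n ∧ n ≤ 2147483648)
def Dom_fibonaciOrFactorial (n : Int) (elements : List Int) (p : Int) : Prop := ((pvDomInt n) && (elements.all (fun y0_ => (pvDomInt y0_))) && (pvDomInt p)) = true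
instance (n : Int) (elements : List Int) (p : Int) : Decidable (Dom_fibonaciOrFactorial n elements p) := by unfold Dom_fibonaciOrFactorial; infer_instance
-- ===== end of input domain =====

-- B replaces A's recursive Fibonacci and factorial with iterative pair/product loops and
-- sums directly over the elements instead of indexing (alternative decomposition).


-- ===== PORT A =====
-- A's recursive fibo/factorial diverge (RecursionError) for negative arguments;
-- those inputs are excluded by Pre_, so the ports use .toNat there harmlessly.
def pvFactA : Nat → Int
  | 0 => 1
  | 1 => 1
  | k+2 => ((k : Int) + 2) * pvFactA (k+1)

def pvFactorialA (m : Int) : Int := pvFactA m.toNat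

def pvFibA : Nat → Int
  | 0 => 0
  | 1 => 1
  | k+2 => pvFibA (k+1) + pvFibA k

def pvFiboA (m : Int) : Int := pvFibA m.toNat

def fibonaciOrFactorial (n : Int) (elements : List Int) (p : Int) : Int :=
  let sum0 : Int := 0
  let sum1 := if p = 1 then
      (PySem.List.pyRange 0 (elements.length : Int) 1).foldl
        (fun s i => s + pvFiboA (PySem.List.pyGetD elements i 0)) sum0
    else sum0
  let sum2 := if p = 2 then
      (PySem.List.pyRange 0 (elements.length : Int) 1).foldl
        (fun s i => s + pvFactorialA (PySem.List.pyGetD elements i 0)) sum1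
    else sum1
  sum2

-- ===== PORT B =====
def pvFibIter (m : Int) : Int :=
  ((PySem.List.pyRange 0 m 1).foldl
    (fun (ab : Int × Int) _ => (ab.2, ab.1 + ab.2)) (0, 1)).1

def pvFactIter (m : Int) : Int :=
  (PySem.List.pyRange 2 (m + 1) 1).foldl (fun r k => r * k) 1

def fibonaciOrFactorial_alt (n : Int) (elements : List Int) (p : Int) : Int :=
  if p = 1 then elements.foldl (fun s e => s + pvFibIter e) 0
  else if p = 2 then elements.foldl (fun s e => s + pvFactIter e) 0
  else 0

-- ===== PRECONDITION & SPEC =====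
-- Pre_ excludes exactly the inputs where A raises: with p = 1 or p = 2, a negative
-- element makes A's recursive fibo/factorial miss the base case (RecursionError).
def Pre_fibonaciOrFactorial (n : Int) (elements : List Int) (p : Int) : Prop :=
  (p = 1 ∨ p = 2) → ∀ x ∈ elements, 0 ≤ x
instance (n : Int) (elements : List Int) (p : Int) : Decidable (Pre_fibonaciOrFactorial n elements p) := by unfold Pre_fibonaciOrFactorial; infer_instance

def pvWitness_fibonaciOrFactorial : Int × List Int × Int := (0, ([0, 1, 2, 5], 1))

def Spec_fibonaciOrFactorial (n : Int) (elements : List Int) (p : Int) (out : Int) : Prop := out = fibonaciOrFactorial_alt n elements p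
instance (n : Int) (elements : List Int) (p : Int) (out : Int) : Decidable (Spec_fibonaciOrFactorial n elements p out) := by unfold Spec_fibonaciOrFactorial; infer_instance

-- ===== CLAIM (what is proved, stated in full; the proofs are below) =====
def Claim_equal_fibonaciOrFactorial : Prop := ∀ (n : Int) (elements : List Int) (p : Int), Dom_fibonaciOrFactorial n elements p → Pre_fibonaciOrFactorial n elements p → Spec_fibonaciOrFactorial n elements p (fibonaciOrFactorial n elements p)

-- ===== LEMMAS AND PROOFS =====

-- the pair loop of B's _fib carries consecutive Fibonacci numbers of A's fibo
theorem pvFib_loop (k : Nat) :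
    (PySem.List.pyRange 0 (k : Int) 1).foldl
      (fun (ab : Int × Int) _ => (ab.2, ab.1 + ab.2)) (0, 1) = (pvFibA k, pvFibA (k+1)) := by
  induction k with
  | zero => simp [PySem.List.pyRange_one_eq_nil, pvFibA]
  | succ k ih =>
    push_cast
    rw [PySem.List.pyRange_one_succ_right (by exact_mod_cast Nat.zero_le k), List.foldl_append, ih]
    simp [pvFibA, Int.add_comm]

theorem pvFibIter_eq (m : Int) (hm : 0 ≤ m) : pvFibIter m = pvFiboA m := by
  have h : m = (m.toNat : Int) := (Int.toNat_of_nonneg hm).symm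
  rw [pvFibIter, pvFiboA, h, pvFib_loop]; simp; congr 1; omega

-- the product loop of B's _fact equals A's recursive factorial
theorem pvFact_loop (k : Nat) :
    (PySem.List.pyRange 2 ((k : Int) + 1) 1).foldl (fun r x => r * x) 1 = pvFactA k := by
  induction k with
  | zero => simp [PySem.List.pyRange_one_eq_nil, pvFactA]
  | succ k ih =>
    match k, ih with
    | 0, _ => simp [PySem.List.pyRange_one_eq_nil, pvFactA]
    | j+1, ih =>
      push_cast
      rw [show ((j : Int) + 1 + 1 + 1) = ((j : Int) + 1 + 1) + 1 by ring,
        PySem.List.pyRange_one_succ_right (by omega), List.foldl_append]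
      push_cast at ih
      rw [ih]
      show pvFactA (j+1) * ((j : Int) + 2) = pvFactA (j+2)
      rw [show pvFactA (j+2) = ((j : Int) + 2) * pvFactA (j+1) from rfl, mul_comm]

theorem pvFactIter_eq (m : Int) (hm : 0 ≤ m) : pvFactIter m = pvFactorialA m := by
  have h : m = (m.toNat : Int) := (Int.toNat_of_nonneg hm).symm
  rw [pvFactIter, pvFactorialA, h, pvFact_loop]; simp; congr 1; omega

-- ===== VERDICT (by name: the statement is the Claim_ definition above) =====
theorem fibonaciOrFactorial_spec : Claim_equal_fibonaciOrFactorial := by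
  intro n elements p _hd hpre
  unfold Spec_fibonaciOrFactorial fibonaciOrFactorial fibonaciOrFactorial_alt
  by_cases hp1 : p = 1
  · have hnn := hpre (Or.inl hp1)
    simp only [hp1, if_neg (by norm_num : (1:Int) ≠ 2)]
    rw [PySem.List.foldl_pyRange_zero_pyGetD' elements 0 (fun s e => s + pvFiboA e) 0]
    apply PySem.List.foldl_congr_mem
    intro a x hx
    rw [pvFibIter_eq x (hnn x hx)]
  · by_cases hp2 : p = 2
    · have hnn := hpre (Or.inr hp2)
      simp only [hp2, if_neg (by norm_num : (2:Int) ≠ 1)]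
      rw [PySem.List.foldl_pyRange_zero_pyGetD' elements 0 (fun s e => s + pvFactorialA e) 0]
      apply PySem.List.foldl_congr_mem
      intro a x hx
      rw [pvFactIter_eq x (hnn x hx)]
    · simp [hp1, hp2]
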